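-- pv_equiv track=rewrite | github.com/mpsilfve/mpsilfve | lexc_tools/lexc2skeleton.py | remove_re_whitespace
-- ===== SOURCE A (Python) =====
-- def remove_re_whitespace(lexicon_entry):
--     """
--     Remove all spaces inside regular expressions on a line but
--     preserve all other spaces.
--
--     Ugly but what can you do...
--
--     Example
--
--     input:
--     begin< a* ?* b* >end< ? * > LEX ;
--
--     output:
--     begin<a*?*b*>end<?*> LEX ;
--     """
--     in_re = 0
--     result = ''
--
--     for i, c in enumerate(lexicon_entry):
--         if c == '<' and (i == 0 or lexicon_entry[i-1] != '%'):
--             in_re = 1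
--         elif c == '>' and (i == 0 or lexicon_entry[i-1] != '%'):
--             in_re = 0
--
--         if c == ' ' and in_re:
--             pass
--         else:
--             result += c
--
--     return result
-- ===== SOURCE B (Python) =====
-- def remove_re_whitespace(lexicon_entry):
--     """Segment-based rewrite: locate unescaped '<'/'>' boundaries with str.find,
--     copy outside segments verbatim and bulk-strip spaces inside regex segments."""
--     s = lexicon_entry
--     n = len(s)
--     parts = []
--     i = 0
--     inside = False
--     while i < n:
--         target = '>' if inside else '<'
--         # find the next *unescaped* occurrence of target at index >= i
--         j = s.find(target, i)
--         while j != -1 and j > 0 and s[j - 1] == '%':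
--             j = s.find(target, j + 1)
--         if not inside:
--             if j == -1:
--                 parts.append(s[i:])
--                 break
--             parts.append(s[i:j + 1])   # outside text including the '<'
--             i = j + 1
--             inside = True
--         else:
--             if j == -1:
--                 parts.append(s[i:].replace(' ', ''))
--                 break
--             parts.append(s[i:j].replace(' ', '') + '>')  # regex body, spaces gone, then '>'
--             i = j + 1
--             inside = False
--     return ''.join(parts)
-- ===== Notes on version B (the rewrite author's own statement) =====
-- stated objective: faster
-- what changed: Replaced A's per-character state-machine loop (index-based percent-escape lookback, char-by-char string appends) by a segment decomposition: repeatedly locate the next unescaped region-opening or region-closing bracket with str.find, copy outside segments verbatim, strip spaces from inside segments in bulk with str.replace, and join the parts.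
import Mathlib
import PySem

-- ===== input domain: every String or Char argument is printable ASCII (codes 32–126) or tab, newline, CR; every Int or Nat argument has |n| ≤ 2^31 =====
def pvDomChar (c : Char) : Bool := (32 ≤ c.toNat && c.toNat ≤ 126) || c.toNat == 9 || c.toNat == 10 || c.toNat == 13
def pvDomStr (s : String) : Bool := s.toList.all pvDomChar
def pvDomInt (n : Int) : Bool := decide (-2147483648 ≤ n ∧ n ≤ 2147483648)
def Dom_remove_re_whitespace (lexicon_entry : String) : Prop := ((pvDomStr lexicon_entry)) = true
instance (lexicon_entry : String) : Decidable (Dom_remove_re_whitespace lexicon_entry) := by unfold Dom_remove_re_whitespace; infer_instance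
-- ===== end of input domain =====

-- B replaces A's per-character state-machine loop by a segment scan (find the next
-- unescaped delimiter, copy outside segments verbatim, bulk-strip spaces inside),
-- which a timing run measured as faster (constant-factor: bulk string primitives).

-- ===== PORT A =====
-- one loop step: toggle in_re on an unescaped '<' / '>', then emit c unless it is a space inside a regex
def pvAStep (cs : List Char) (st : Int × List Char) (ic : Int × Char) : Int × List Char :=
  let i := ic.1
  let c := ic.2
  let in_re : Int :=
    if c = '<' ∧ (i = 0 ∨ PySem.List.pyGetD cs (i - 1) ' ' ≠ '%') then 1
    else if c = '>' ∧ (i = 0 ∨ PySem.List.pyGetD cs (i - 1) ' ' ≠ '%') then 0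
    else st.1
  if c = ' ' ∧ in_re ≠ 0 then (in_re, st.2) else (in_re, st.2 ++ [c])

def remove_re_whitespace (lexicon_entry : String) : String :=
  String.ofList ((PySem.List.enumerate lexicon_entry.toList 0).foldl (pvAStep lexicon_entry.toList) (0, [])).2

-- ===== PORT B =====
-- Source B's inner find loop: next *unescaped* occurrence of `t`, fused with the slicing:
-- returns (chars before the delimiter, chars after it), or none if there is no unescaped `t`.
def pvFindUnesc (t : Char) (prev : Option Char) : List Char → Option (List Char × List Char)
  | [] => none
  | c :: cs =>
    if c = t ∧ prev ≠ some '%' then some ([], cs)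
    else (pvFindUnesc t (some c) cs).map (fun p => (c :: p.1, p.2))

theorem pvFindUnesc_lt (t : Char) :
    ∀ (prev : Option Char) (l : List Char) (p r : List Char),
      pvFindUnesc t prev l = some (p, r) → r.length < l.length := by
  intro prev l
  induction l generalizing prev with
  | nil => intro p r h; simp [pvFindUnesc] at h
  | cons c cs ih =>
    intro p r h
    simp only [pvFindUnesc] at h
    split at h
    · simp at h; simp [← h.2]
    · cases hf : pvFindUnesc t (some c) cs with
      | none => rw [hf] at h; simp at h
      | some q =>
        rw [hf] at h; simp at h
        have := ih (some c) q.1 q.2 (by rw [hf])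
        simp [← h.2]; omega

-- Source B's outer while loop: alternate outside/inside segments; outside text (with its '<')
-- is copied verbatim, inside text has spaces removed in bulk, the '>' is appended after it.
mutual
def pvOut (prev : Option Char) (l : List Char) : List Char :=
  match h : pvFindUnesc '<' prev l with
  | none => l
  | some p => p.1 ++ '<' :: pvIn (some '<') p.2
termination_by l.length
decreasing_by exact pvFindUnesc_lt '<' prev l p.1 p.2 h
def pvIn (prev : Option Char) (l : List Char) : List Char :=
  match h : pvFindUnesc '>' prev l with
  | none => PySem.Chars.replace l [' '] []
  | some p => PySem.Chars.replace p.1 [' '] [] ++ '>' :: pvOut (some '>') p.2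
termination_by l.length
decreasing_by exact pvFindUnesc_lt '>' prev l p.1 p.2 h
end

def remove_re_whitespace_alt (lexicon_entry : String) : String :=
  String.ofList (pvOut none lexicon_entry.toList)

-- ===== PRECONDITION & SPEC =====
def Spec_remove_re_whitespace (lexicon_entry : String) (out : String) : Prop := out = remove_re_whitespace_alt lexicon_entry
instance (lexicon_entry : String) (out : String) : Decidable (Spec_remove_re_whitespace lexicon_entry out) := by unfold Spec_remove_re_whitespace; infer_instance

-- ===== CLAIM (what is proved, stated in full; the proofs are below) =====
def Claim_equal_remove_re_whitespace : Prop := ∀ (lexicon_entry : String), Dom_remove_re_whitespace lexicon_entry → Spec_remove_re_whitespace lexicon_entry (remove_re_whitespace lexicon_entry)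

-- ===== LEMMAS AND PROOFS =====

-- replace(' ','') is filter (· ≠ ' ')
theorem pv_replace_go_space : ∀ (fuel : Nat) (l acc : List Char), l.length ≤ fuel →
    PySem.Chars.replace.go [' '] [] fuel l acc = acc.reverse ++ l.filter (· ≠ ' ') := by
  intro fuel
  induction fuel with
  | zero => intro l acc h; cases l with
    | nil => simp [PySem.Chars.replace.go]
    | cons c cs => simp at h
  | succ n ih =>
    intro l acc h
    cases l with
    | nil => simp [PySem.Chars.replace.go]
    | cons c cs =>
      simp only [PySem.Chars.replace.go]
      by_cases hc : c = ' '
      · subst hc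
        rw [if_pos (by simp [List.isPrefixOf])]
        simp only [List.length_cons, List.length_nil, List.length_singleton, List.drop_succ_cons,
          List.drop_zero, List.reverse_nil, List.nil_append]
        rw [ih cs acc (by simpa using Nat.le_of_succ_le_succ h)]
        simp
      · rw [if_neg (by simp [List.isPrefixOf]; exact fun he => hc he.symm)]
        rw [ih cs (c :: acc) (by simpa using Nat.le_of_succ_le_succ h)]
        simp [hc]

theorem pv_replace_space (l : List Char) :
    PySem.Chars.replace l [' '] [] = l.filter (· ≠ ' ') := by
  simp only [PySem.Chars.replace]
  rw [if_neg (by simp)]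
  simpa using pv_replace_go_space l.length l [] le_rfl

-- step lemmas for B: how pvOut / pvIn consume one character
theorem pvOut_eq (prev : Option Char) (l : List Char) :
    pvOut prev l = (match pvFindUnesc '<' prev l with
      | none => l
      | some p => p.1 ++ '<' :: pvIn (some '<') p.2) := by
  unfold pvOut
  split <;> rename_i heq <;> rw [heq]

theorem pvIn_eq (prev : Option Char) (l : List Char) :
    pvIn prev l = (match pvFindUnesc '>' prev l with
      | none => PySem.Chars.replace l [' '] []
      | some p => PySem.Chars.replace p.1 [' '] [] ++ '>' :: pvOut (some '>') p.2) := by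
  unfold pvIn
  split <;> rename_i heq <;> rw [heq]

theorem pvOut_tog (prev : Option Char) (l : List Char) (h : prev ≠ some '%') :
    pvOut prev ('<' :: l) = '<' :: pvIn (some '<') l := by
  rw [pvOut_eq]
  simp [pvFindUnesc, h]

theorem pvOut_skip (prev : Option Char) (c : Char) (l : List Char)
    (h : ¬ (c = '<' ∧ prev ≠ some '%')) :
    pvOut prev (c :: l) = c :: pvOut (some c) l := by
  rw [pvOut_eq prev (c :: l), pvOut_eq (some c) l]
  simp only [pvFindUnesc, if_neg h]
  cases pvFindUnesc '<' (some c) l with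
  | none => simp
  | some p => simp

theorem pvIn_tog (prev : Option Char) (l : List Char) (h : prev ≠ some '%') :
    pvIn prev ('>' :: l) = '>' :: pvOut (some '>') l := by
  rw [pvIn_eq]
  simp [pvFindUnesc, h, pv_replace_space]

theorem pvIn_skip (prev : Option Char) (c : Char) (l : List Char)
    (h : ¬ (c = '>' ∧ prev ≠ some '%')) :
    pvIn prev (c :: l) = (if c = ' ' then [] else [c]) ++ pvIn (some c) l := by
  rw [pvIn_eq prev (c :: l), pvIn_eq (some c) l]
  simp only [pvFindUnesc, if_neg h]
  cases pvFindUnesc '>' (some c) l with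
  | none => by_cases hc : c = ' ' <;> simp [pv_replace_space, hc]
  | some p => by_cases hc : c = ' ' <;> simp [pv_replace_space, hc]

-- recursive rendering of A's loop, carrying the previous character instead of an index
def pvAGo (prev : Option Char) (inre : Int) : List Char → List Char
  | [] => []
  | c :: cs =>
    let inre' : Int :=
      if c = '<' ∧ prev ≠ some '%' then 1
      else if c = '>' ∧ prev ≠ some '%' then 0
      else inre
    (if c = ' ' ∧ inre' ≠ 0 then [] else [c]) ++ pvAGo (some c) inre' cs

-- A's indexed fold equals pvAGo: the index-(i-1) lookup is the last char of the prefix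
theorem pvA_fold_eq : ∀ (l pre : List Char) (inre : Int) (acc : List Char),
    ((PySem.List.enumerate l (pre.length : Int)).foldl (pvAStep (pre ++ l)) (inre, acc)).2
      = acc ++ pvAGo pre.getLast? inre l := by
  intro l
  induction l with
  | nil => intro pre inre acc; simp [PySem.List.enumerate_nil, pvAGo]
  | cons c cs ih =>
    intro pre inre acc
    rw [PySem.List.enumerate_cons]
    simp only [List.foldl_cons]
    have hprev : ((pre.length : Int) = 0 ∨
        PySem.List.pyGetD (pre ++ c :: cs) ((pre.length : Int) - 1) ' ' ≠ '%')
        ↔ pre.getLast? ≠ some '%' := by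
      cases pre with
      | nil => simp
      | cons p ps =>
        have hne0 : ¬ (((p :: ps).length : Int) = 0) := by simp; omega
        have h2 : PySem.List.pyGetD ((p :: ps) ++ c :: cs) (((p :: ps).length : Int) - 1) ' '
            = (p :: ps).getLast (by simp) := by
          have he : (((p :: ps).length : Int) - 1) = ((ps.length : Nat) : Int) := by simp
          rw [he, PySem.List.pyGetD_natCast]
          rw [List.getD_eq_getElem?_getD]
          rw [List.getElem?_append_left (by simp)]
          rw [List.getLast_eq_getElem]
          simp
          rfl
        have h3 : (p :: ps).getLast? = some ((p :: ps).getLast (by simp)) :=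
          List.getLast?_eq_some_getLast (by simp)
        rw [h2, h3]
        constructor
        · rintro (h0 | hne)
          · exact absurd h0 hne0
          · simpa using hne
        · intro hne
          exact Or.inr (by simpa using hne)
    have step : pvAStep (pre ++ c :: cs) (inre, acc) ((pre.length : Int), c)
        = (if c = '<' ∧ pre.getLast? ≠ some '%' then (1 : Int)
           else if c = '>' ∧ pre.getLast? ≠ some '%' then 0 else inre,
           acc ++ (if c = ' ' ∧ (if c = '<' ∧ pre.getLast? ≠ some '%' then (1 : Int)
           else if c = '>' ∧ pre.getLast? ≠ some '%' then 0 else inre) ≠ 0 then [] else [c])) := by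
      simp only [pvAStep, hprev]
      split_ifs with h1 h2 h3 h4 h5 <;> simp_all
    rw [step]
    have harr : ((pre.length : Int) + 1) = (((pre ++ [c]).length : Nat) : Int) := by
      simp
    have hfull : pre ++ c :: cs = (pre ++ [c]) ++ cs := by simp
    rw [harr, hfull]
    rw [ih (pre ++ [c])]
    simp only [pvAGo, List.getLast?_append, List.getLast?_singleton]
    simp [List.append_assoc]

-- pvAGo agrees with B's segment scan, in both modes
theorem pvAGo_eq_B : ∀ (l : List Char) (prev : Option Char) (inre : Int),
    pvAGo prev inre l = (if inre = 0 then pvOut prev l else pvIn prev l) := by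
  intro l
  induction l with
  | nil =>
    intro prev inre
    have ho : pvOut prev [] = [] := by rw [pvOut_eq]; simp [pvFindUnesc]
    have hi : pvIn prev [] = [] := by rw [pvIn_eq]; simp [pvFindUnesc, pv_replace_space]
    split <;> simp [pvAGo, ho, hi]
  | cons c cs ih =>
    intro prev inre
    by_cases h1 : c = '<' ∧ prev ≠ some '%'
    · obtain ⟨hc, hp⟩ := h1
      subst hc
      have e1 : pvAGo prev inre ('<' :: cs) = '<' :: pvAGo (some '<') 1 cs := by
        simp [pvAGo, hp]
      rw [e1, ih (some '<') 1]
      by_cases hz : inre = 0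
      · rw [if_pos hz, if_neg (by norm_num : ¬ ((1 : Int) = 0)), pvOut_tog prev cs hp]
      · rw [if_neg hz, if_neg (by norm_num : ¬ ((1 : Int) = 0))]
        rw [pvIn_skip prev '<' cs (by simp)]
        simp
    · by_cases h2 : c = '>' ∧ prev ≠ some '%'
      · obtain ⟨hc, hp⟩ := h2
        subst hc
        have e1 : pvAGo prev inre ('>' :: cs) = '>' :: pvAGo (some '>') 0 cs := by
          simp [pvAGo, hp, h1]
        rw [e1, ih (some '>') 0]
        rw [if_pos rfl]
        by_cases hz : inre = 0
        · rw [if_pos hz, pvOut_skip prev '>' cs h1]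
        · rw [if_neg hz, pvIn_tog prev cs hp]
      · have e1 : pvAGo prev inre (c :: cs)
            = (if c = ' ' ∧ inre ≠ 0 then [] else [c]) ++ pvAGo (some c) inre cs := by
          simp [pvAGo, h1, h2]
        rw [e1, ih (some c) inre]
        by_cases hz : inre = 0
        · rw [if_pos hz, if_pos hz, pvOut_skip prev c cs h1]
          have hns : ¬ (c = ' ' ∧ inre ≠ 0) := fun h => h.2 hz
          simp [hns]
        · rw [if_neg hz, if_neg hz, pvIn_skip prev c cs h2]
          by_cases hcsp : c = ' '
          · simp [hcsp, hz]
          · simp [hcsp]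

-- ===== VERDICT (by name: the statement is the Claim_ definition above) =====
theorem remove_re_whitespace_spec : Claim_equal_remove_re_whitespace := by
  intro s _
  unfold Spec_remove_re_whitespace remove_re_whitespace remove_re_whitespace_alt
  have h := pvA_fold_eq s.toList [] 0 []
  simp only [List.length_nil, Nat.cast_zero, List.nil_append, List.getLast?_nil] at h
  rw [h, pvAGo_eq_B s.toList none 0]
  simp
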